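-- pv_equiv track=rewrite | github.com/Op-2005/neural_hydro | topology_analysis/phase4/hop_distance.py | group_nodes_by_hop_distance
-- ===== SOURCE A (Python) =====
-- from typing import Dict, Set, Optional
--
-- def group_nodes_by_hop_distance(distances: Dict[str, Optional[int]]) -> Dict[int, Set[str]]:
--     """
--     Group nodes by their hop distance from source.
--
--     Parameters
--     ----------
--     distances : Dict[str, Optional[int]]
--         Node to hop distance mapping
--
--     Returns
--     -------
--     Dict[int, Set[str]]
--         Mapping from hop distance to set of node IDs
--     """
--     groups: Dict[int, Set[str]] = {}
--
--     for node, dist in distances.items():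
--         if dist is None:
--             # Unreachable nodes (infinite distance)
--             continue
--         if dist not in groups:
--             groups[dist] = set()
--         groups[dist].add(node)
--
--     return groups
-- ===== SOURCE B (Python) =====
-- def group_nodes_by_hop_distance(distances):
--     """Same grouping via a filter / ordered-dedup / comprehension pipeline
--     instead of incremental dict accumulation."""
--     reach = [(n, d) for n, d in distances.items() if d is not None]
--     order = dict.fromkeys(d for _, d in reach)
--     return {d: {n for n, dd in reach if dd == d} for d in order}
-- ===== Notes on version B (the rewrite author's own statement) =====
-- stated objective: alternative
-- what changed: Replaces the single incremental loop that mutates a dict of sets with a three-stage pipeline: filter out unreachable nodes, collect the distinct distances in first-appearance order with dict.fromkeys, then build the whole result as one comprehension with a per-distance scan.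
import Mathlib
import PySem

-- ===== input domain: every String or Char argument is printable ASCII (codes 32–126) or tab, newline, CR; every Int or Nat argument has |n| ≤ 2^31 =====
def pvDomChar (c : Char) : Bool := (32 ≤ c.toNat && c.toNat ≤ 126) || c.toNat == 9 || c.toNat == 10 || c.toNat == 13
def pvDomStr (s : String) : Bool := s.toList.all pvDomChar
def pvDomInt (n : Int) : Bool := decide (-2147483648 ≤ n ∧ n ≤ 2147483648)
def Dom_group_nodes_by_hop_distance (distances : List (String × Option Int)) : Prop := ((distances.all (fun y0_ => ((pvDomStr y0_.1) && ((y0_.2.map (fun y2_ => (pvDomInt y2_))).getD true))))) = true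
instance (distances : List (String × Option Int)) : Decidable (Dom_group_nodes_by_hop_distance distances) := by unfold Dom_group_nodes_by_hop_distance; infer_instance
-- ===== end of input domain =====

-- B replaces A's incremental dict-of-sets accumulation with a filter / ordered-dedup /
-- per-distance-scan pipeline (alternative decomposition, same results).


-- ===== PORT A =====
-- one iteration of A's loop body
def pvStepA (groups : PySem.Dict Int (PySem.Set String)) (p : String × Option Int) :
    PySem.Dict Int (PySem.Set String) :=
  match p.2 with
  | none => groups                                     -- unreachable: continue
  | some d =>
    let groups := if groups.contains d then groups else groups.insert d PySem.Set.empty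
    groups.modify d PySem.Set.empty (fun s => s.add p.1)   -- groups[dist].add(node)

def group_nodes_by_hop_distance (distances : List (String × Option Int)) : List (Int × List String) :=
  (distances.foldl pvStepA PySem.Dict.empty).items

-- ===== PORT B =====
def group_nodes_by_hop_distance_alt (distances : List (String × Option Int)) : List (Int × List String) :=
  let reach : List (String × Int) := distances.filterMap (fun p => p.2.map (fun d => (p.1, d)))
  let order : List Int := PySem.List.dedup (reach.map Prod.snd)
  order.map (fun d => (d, PySem.Set.ofList ((reach.filter (fun p => p.2 == d)).map Prod.fst)))

-- ===== PRECONDITION & SPEC =====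
def Spec_group_nodes_by_hop_distance (distances : List (String × Option Int)) (out : List (Int × List String)) : Prop := out = group_nodes_by_hop_distance_alt distances
instance (distances : List (String × Option Int)) (out : List (Int × List String)) : Decidable (Spec_group_nodes_by_hop_distance distances out) := by unfold Spec_group_nodes_by_hop_distance; infer_instance

-- ===== CLAIM (what is proved, stated in full; the proofs are below) =====
def Claim_equal_group_nodes_by_hop_distance : Prop := ∀ (distances : List (String × Option Int)), Dom_group_nodes_by_hop_distance distances → Spec_group_nodes_by_hop_distance distances (group_nodes_by_hop_distance distances)

-- ===== LEMMAS AND PROOFS =====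

-- the reachable (node, dist) pairs, as B computes them
def pvReach (l : List (String × Option Int)) : List (String × Int) :=
  l.filterMap (fun p => p.2.map (fun d => (p.1, d)))

-- A's conditional "groups[dist] = set()" never changes any getD-with-empty-default lookup
theorem pvCondInsert_getD (g : PySem.Dict Int (PySem.Set String)) (d d' : Int) :
    (if g.contains d then g else g.insert d PySem.Set.empty).getD d' PySem.Set.empty
      = g.getD d' PySem.Set.empty := by
  by_cases h : g.contains d = true
  · simp [h]
  · simp only [h, Bool.false_eq_true, if_false]
    rw [PySem.Dict.getD_insert]
    split_ifs with he
    · subst he; rw [PySem.Dict.getD_of_not_contains _ _ (by simpa using h)]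
    · rfl

-- A's dict, looked up at any distance, holds exactly B's per-distance node set
theorem pvGetD_invariant (l : List (String × Option Int)) : ∀ d' : Int,
    (l.foldl pvStepA PySem.Dict.empty).getD d' PySem.Set.empty
      = PySem.Set.ofList (((pvReach l).filter (fun p => p.2 == d')).map Prod.fst) := by
  induction l using List.reverseRecOn with
  | nil => intro d'; simp [pvReach, PySem.Set.ofList]
  | append_singleton l x ih =>
    intro d'
    rw [List.foldl_append]
    match hx : x.2 with
    | none =>
      simp only [List.foldl_cons, List.foldl_nil, pvStepA, hx]
      rw [ih]
      simp [pvReach, List.filterMap_append, hx]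
    | some d =>
      simp only [List.foldl_cons, List.foldl_nil, pvStepA, hx]
      rw [PySem.Dict.getD_modify, pvCondInsert_getD, pvCondInsert_getD, ih d', ih d]
      have hre : pvReach (l ++ [x]) = pvReach l ++ [(x.1, d)] := by
        simp [pvReach, List.filterMap_append, hx]
      rw [hre, List.filter_append]
      by_cases he : d' = d
      · subst he
        simp [PySem.Set.ofList_append_singleton]
      · have hb : (d == d') = false := by simp [Ne.symm he]
        simp [List.filter, hb, he]

-- A's dict has exactly B's keys, in the same (first-appearance) order
theorem pvKeys_invariant (l : List (String × Option Int)) :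
    (l.foldl pvStepA PySem.Dict.empty).keys
      = PySem.Set.ofList ((pvReach l).map Prod.snd) := by
  induction l using List.reverseRecOn with
  | nil => simp [pvReach, PySem.Set.ofList, PySem.Dict.keys_empty]
  | append_singleton l x ih =>
    rw [List.foldl_append]
    match hx : x.2 with
    | none =>
      simp only [List.foldl_cons, List.foldl_nil, pvStepA, hx]
      rw [ih]
      simp [pvReach, List.filterMap_append, hx]
    | some d =>
      simp only [List.foldl_cons, List.foldl_nil, pvStepA, hx]
      have hre : (pvReach (l ++ [x])).map Prod.snd = (pvReach l).map Prod.snd ++ [d] := by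
        simp [pvReach, List.filterMap_append, hx]
      rw [PySem.Dict.keys_modify, hre, PySem.Set.ofList_append_singleton]
      set g := l.foldl pvStepA PySem.Dict.empty with hg
      by_cases h : g.contains d = true
      · have hmem : d ∈ PySem.Set.ofList ((pvReach l).map Prod.snd) := by
          rw [← ih]; exact (PySem.Dict.contains_iff_mem_keys g d).mp h
        rw [if_pos h, PySem.Dict.keys_insert_of_contains _ _ h, ih,
          PySem.Set.add_of_mem hmem]
      · have hnmem : d ∉ PySem.Set.ofList ((pvReach l).map Prod.snd) := by
          rw [← ih]
          intro hm
          exact h ((PySem.Dict.contains_iff_mem_keys g d).mpr hm)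
        rw [if_neg h, PySem.Dict.keys_insert_of_contains _ _
            (PySem.Dict.contains_insert_self g d PySem.Set.empty),
          PySem.Dict.keys_insert_of_not_contains _ _ (by simpa using h), ih,
          PySem.Set.add_of_not_mem hnmem]

-- ===== VERDICT (by name: the statement is the Claim_ definition above) =====
theorem group_nodes_by_hop_distance_spec : Claim_equal_group_nodes_by_hop_distance := by
  intro distances _
  unfold Spec_group_nodes_by_hop_distance group_nodes_by_hop_distance
  dsimp only [group_nodes_by_hop_distance_alt]
  have hnd : (distances.foldl pvStepA PySem.Dict.empty).keys.Nodup := by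
    rw [pvKeys_invariant]; exact PySem.Set.nodup_ofList _
  rw [PySem.Dict.items_eq_map_keys _ hnd PySem.Set.empty, pvKeys_invariant,
    PySem.List.dedup_eq_ofList]
  exact List.map_congr_left (fun d _ => by rw [pvGetD_invariant]; rfl)
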